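-- pv_equiv track=rewrite | github.com/kalmukdmitri/docker_bi | extract/fb_refresh.py | utm_to_colums_full
-- ===== SOURCE A (Python) =====
-- def utm_to_colums_full(column):
--     sourse_list = []
--     medium_list = []
--     project_list = []
--     for row in column:
--
--         if row and 'utm_source' in row:
--             utm = row.split('?')
--             domain = row.split("/")[2]
--             tag_list = [y.split('=') for y in utm[-1].split('&')]
--             tags= {i[0]:i[1] for i in tag_list}
--             sourse_list.append(tags['utm_source'])
--             medium_list.append(tags['utm_campaign'])
--             project_list.append(domain)
--         else:
--             sourse_list.append(None)
--             medium_list.append(None)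
--             project_list.append(None)
--
--     return (sourse_list, medium_list,project_list)
-- ===== SOURCE B (Python) =====
-- def _has_utm(row):
--     return bool(row) and 'utm_source' in row
--
--
-- def _tag(row, key):
--     d = {p[0]: p[1] for p in (y.split('=') for y in row.split('?')[-1].split('&'))}
--     return d[key]
--
--
-- def utm_to_colums_full(column):
--     sourse_list = [_tag(r, 'utm_source') if _has_utm(r) else None for r in column]
--     medium_list = [_tag(r, 'utm_campaign') if _has_utm(r) else None for r in column]
--     project_list = [r.split('/')[2] if _has_utm(r) else None for r in column]
--     return (sourse_list, medium_list, project_list)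
-- ===== Notes on version B (the rewrite author's own statement) =====
-- stated objective: alternative
-- what changed: Replaces A's single loop that threads three parallel accumulator lists by three independent staged passes over the input, each comprehension extracting one output column (source, campaign, domain) with small predicate/lookup helpers; the input is re-scanned per column.
import Mathlib
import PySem

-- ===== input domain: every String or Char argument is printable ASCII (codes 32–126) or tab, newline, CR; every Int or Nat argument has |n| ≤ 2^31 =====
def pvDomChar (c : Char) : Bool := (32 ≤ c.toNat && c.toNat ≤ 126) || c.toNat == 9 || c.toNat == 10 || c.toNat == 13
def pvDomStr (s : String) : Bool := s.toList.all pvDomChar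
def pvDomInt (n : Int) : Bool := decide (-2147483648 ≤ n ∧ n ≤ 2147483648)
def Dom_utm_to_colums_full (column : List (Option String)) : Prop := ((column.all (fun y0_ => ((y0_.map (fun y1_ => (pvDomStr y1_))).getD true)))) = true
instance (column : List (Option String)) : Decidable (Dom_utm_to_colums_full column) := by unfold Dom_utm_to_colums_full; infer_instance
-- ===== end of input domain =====

-- s.split(sep) for a nonempty separator (split? is none only for sep = ""; all separators here are literals)
def pvSplit (s sep : String) : List String := (PySem.Str.split? s sep).getD []

-- B replaces A's single loop over three parallel accumulators by three independent
-- passes, each producing one output column (no speed claim).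

-- ===== PORT A =====
-- literal transliteration of A: one loop, three accumulator lists appended to in place
def utm_to_colums_full (column : List (Option String)) : List (Option String) × List (Option String) × List (Option String) :=
  column.foldl (fun acc row =>
    match row with
    | some s =>
      if s ≠ "" ∧ PySem.Str.isIn "utm_source" s = true then
        let utm := pvSplit s "?"
        let domain := PySem.List.pyGetD (pvSplit s "/") 2 ""   -- row.split("/")[2]; IndexError excluded by Pre_
        let tag_list := (pvSplit (PySem.List.pyGetD utm (-1) "") "&").map (fun y => pvSplit y "=")
        let tags := tag_list.foldl (fun d i => PySem.Dict.insert d (PySem.List.pyGetD i 0 "") (PySem.List.pyGetD i 1 "")) PySem.Dict.empty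
        (acc.1 ++ [some (PySem.Dict.getD tags "utm_source" "")],    -- KeyError / IndexError excluded by Pre_
         acc.2.1 ++ [some (PySem.Dict.getD tags "utm_campaign" "")],
         acc.2.2 ++ [some domain])
      else (acc.1 ++ [none], acc.2.1 ++ [none], acc.2.2 ++ [none])
    | none => (acc.1 ++ [none], acc.2.1 ++ [none], acc.2.2 ++ [none]))
    ([], [], [])

-- ===== PORT B =====
-- helper: bool(row) and 'utm_source' in row
def pvHasUtm (row : Option String) : Bool :=
  match row with
  | some s => s ≠ "" && PySem.Str.isIn "utm_source" s
  | none => false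

-- helper: the query-tag dict lookup _tag(row, key)
def pvTag (s key : String) : String :=
  let d := ((pvSplit (PySem.List.pyGetD (pvSplit s "?") (-1) "") "&").map
      (fun y => pvSplit y "=")).foldl
    (fun d p => PySem.Dict.insert d (PySem.List.pyGetD p 0 "") (PySem.List.pyGetD p 1 "")) PySem.Dict.empty
  PySem.Dict.getD d key ""    -- d[key]; KeyError excluded by Pre_

-- three independent passes, one per output column
def utm_to_colums_full_alt (column : List (Option String)) : List (Option String) × List (Option String) × List (Option String) :=
  (column.map (fun r => if pvHasUtm r then some (pvTag (r.getD "") "utm_source") else none),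
   column.map (fun r => if pvHasUtm r then some (pvTag (r.getD "") "utm_campaign") else none),
   column.map (fun r => if pvHasUtm r then some (PySem.List.pyGetD (pvSplit (r.getD "") "/") 2 "") else none))

-- ===== PRECONDITION & SPEC =====
-- Pre_ excludes exactly the inputs where Python A raises: a matching row whose URL has no third '/'-field
-- (IndexError), a query tag with no '=' (IndexError), or a query lacking the 'utm_source'/'utm_campaign' key (KeyError).
def Pre_utm_to_colums_full (column : List (Option String)) : Prop :=
  ∀ row ∈ column, ∀ s, row = some s → s ≠ "" → PySem.Str.isIn "utm_source" s = true →
    3 ≤ (pvSplit s "/").length ∧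
    (∀ y ∈ pvSplit (PySem.List.pyGetD (pvSplit s "?") (-1) "") "&",
        2 ≤ (pvSplit y "=").length) ∧
    "utm_source" ∈ (pvSplit (PySem.List.pyGetD (pvSplit s "?") (-1) "") "&").map
        (fun y => PySem.List.pyGetD (pvSplit y "=") 0 "") ∧
    "utm_campaign" ∈ (pvSplit (PySem.List.pyGetD (pvSplit s "?") (-1) "") "&").map
        (fun y => PySem.List.pyGetD (pvSplit y "=") 0 "")
instance (column : List (Option String)) : Decidable (Pre_utm_to_colums_full column) := by
  unfold Pre_utm_to_colums_full; infer_instance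

def pvWitness_utm_to_colums_full : List (Option String) :=
  [some "http://a.b/c?utm_source=s&utm_campaign=c", none, some ""]

def Spec_utm_to_colums_full (column : List (Option String)) (out : List (Option String) × List (Option String) × List (Option String)) : Prop := out = utm_to_colums_full_alt column
instance (column : List (Option String)) (out : List (Option String) × List (Option String) × List (Option String)) : Decidable (Spec_utm_to_colums_full column out) := by unfold Spec_utm_to_colums_full; infer_instance

-- ===== CLAIM (what is proved, stated in full; the proofs are below) =====
def Claim_equal_utm_to_colums_full : Prop := ∀ (column : List (Option String)), Dom_utm_to_colums_full column → Pre_utm_to_colums_full column → Spec_utm_to_colums_full column (utm_to_colums_full column)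

-- ===== LEMMAS AND PROOFS =====

-- A's loop appends, per row, exactly the entries of B's three column passes
theorem pv_foldA (column : List (Option String))
    (acc : List (Option String) × List (Option String) × List (Option String)) :
    column.foldl (fun acc row =>
      match row with
      | some s =>
        if s ≠ "" ∧ PySem.Str.isIn "utm_source" s = true then
          let utm := pvSplit s "?"
          let domain := PySem.List.pyGetD (pvSplit s "/") 2 ""
          let tag_list := (pvSplit (PySem.List.pyGetD utm (-1) "") "&").map (fun y => pvSplit y "=")
          let tags := tag_list.foldl (fun d i => PySem.Dict.insert d (PySem.List.pyGetD i 0 "") (PySem.List.pyGetD i 1 "")) PySem.Dict.empty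
          (acc.1 ++ [some (PySem.Dict.getD tags "utm_source" "")],
           acc.2.1 ++ [some (PySem.Dict.getD tags "utm_campaign" "")],
           acc.2.2 ++ [some domain])
        else (acc.1 ++ [none], acc.2.1 ++ [none], acc.2.2 ++ [none])
      | none => (acc.1 ++ [none], acc.2.1 ++ [none], acc.2.2 ++ [none])) acc
    = (acc.1 ++ column.map (fun r => if pvHasUtm r then some (pvTag (r.getD "") "utm_source") else none),
       acc.2.1 ++ column.map (fun r => if pvHasUtm r then some (pvTag (r.getD "") "utm_campaign") else none),
       acc.2.2 ++ column.map (fun r => if pvHasUtm r then some (PySem.List.pyGetD (pvSplit (r.getD "") "/") 2 "") else none)) := by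
  induction column generalizing acc with
  | nil => simp
  | cons row rest ih =>
    simp only [List.foldl_cons, List.map_cons, ih]
    cases row with
    | none => simp [pvHasUtm]
    | some s =>
      by_cases h : s ≠ "" ∧ PySem.Str.isIn "utm_source" s = true
      · simp only [if_pos h]
        have hb : pvHasUtm (some s) = true := by
          simp only [pvHasUtm, Bool.and_eq_true]; exact ⟨by simpa using h.1, h.2⟩
        simp [hb, pvTag]
      · simp only [if_neg h]
        have hb : pvHasUtm (some s) = false := by
          simp only [pvHasUtm, Bool.and_eq_false_iff]
          rcases not_and_or.mp h with h1 | h2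
          · left; simpa using h1
          · right; simpa using h2
        simp [hb]

-- ===== VERDICT (by name: the statement is the Claim_ definition above) =====
theorem utm_to_colums_full_spec : Claim_equal_utm_to_colums_full := by
  intro column _ _
  unfold Spec_utm_to_colums_full utm_to_colums_full utm_to_colums_full_alt
  rw [pv_foldA]
  simp
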